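-- pv_equiv track=rewrite | github.com/HoHoHoCCH/cipherchallengestuff | cracker.py | initial_key
-- ===== SOURCE A (Python) =====
-- import string
-- from collections import Counter
--
-- ALPH = string.ascii_lowercase
--
-- ETAOIN = "etaoinshrdlcumwfgypbvkjxqz"
--
-- def initial_key(ciphertext):
--
--     only_letters = [ch.lower() for ch in ciphertext if ch.isalpha()]
--     freq = Counter(only_letters)
--     ranked = ''.join(c for c, _ in freq.most_common())
--
--
--     for ch in ALPH:
--         if ch not in ranked:
--             ranked += ch
--
--     guess_map = {c: ETAOIN[i] for i, c in enumerate(ranked)}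
--     return guess_map
-- ===== SOURCE B (Python) =====
-- import string
--
-- ALPH = string.ascii_lowercase
--
-- ETAOIN = "etaoinshrdlcumwfgypbvkjxqz"
--
-- def initial_key(ciphertext):
--     # Selection instead of sorting: count letters while recording first-seen
--     # order, then build the key slot by slot — for each ETAOIN letter, scan the
--     # remaining alphabet letters for the best one (highest count; ties broken by
--     # first appearance, unseen letters last in alphabet order), remove it and
--     # assign it this ETAOIN letter.  No sort / most_common call at all.
--     counts = {}
--     order = {}
--     for ch in ciphertext:
--         if ch.isalpha():
--             c = ch.lower()
--             if c not in counts: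
--                 order[c] = len(order)
--                 counts[c] = 0
--             counts[c] += 1
--     key = lambda c: -26 * counts.get(c, 0) + order.get(c, ALPH.index(c))
--     remaining = list(ALPH)
--     guess_map = {}
--     for plain in ETAOIN:
--         best = remaining[0]
--         for c in remaining[1:]:
--             if key(c) < key(best):
--                 best = c
--         remaining.remove(best)
--         guess_map[best] = plain
--     return guess_map
-- ===== Notes on version B (the rewrite author's own statement) =====
-- stated objective: alternative
-- what changed: Replaces Counter.most_common (a sort) plus an append-missing-letters loop by selection: after one counting pass that records first-seen order, each ETAOIN slot is filled by a linear argmin scan over the remaining alphabet letters, which are removed one by one; no sort is performed.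
import Mathlib
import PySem

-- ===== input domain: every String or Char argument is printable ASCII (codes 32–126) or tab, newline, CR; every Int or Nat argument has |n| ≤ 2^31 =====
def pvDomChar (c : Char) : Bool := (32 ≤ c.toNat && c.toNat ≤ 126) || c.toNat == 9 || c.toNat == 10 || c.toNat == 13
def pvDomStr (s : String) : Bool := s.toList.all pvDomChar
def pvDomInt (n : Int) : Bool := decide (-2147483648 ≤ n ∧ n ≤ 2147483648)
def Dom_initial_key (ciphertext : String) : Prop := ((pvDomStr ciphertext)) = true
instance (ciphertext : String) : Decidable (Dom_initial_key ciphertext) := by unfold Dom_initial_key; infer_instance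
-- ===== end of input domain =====

-- B replaces Counter.most_common (a sort) plus an append-missing-letters loop by
-- selection: one counting pass recording first-seen order, then each ETAOIN slot is
-- filled by an argmin scan over the remaining alphabet letters (objective: alternative).

-- ===== PORT A =====
def pvALPH : List Char :=
  ['a','b','c','d','e','f','g','h','i','j','k','l','m','n','o','p','q','r','s','t','u','v','w','x','y','z']

def pvETAOIN : List Char :=
  ['e','t','a','o','i','n','s','h','r','d','l','c','u','m','w','f','g','y','p','b','v','k','j','x','q','z']

def initial_key (ciphertext : String) : List (String × String) :=
  -- only_letters = [ch.lower() for ch in ciphertext if ch.isalpha()]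
  let only_letters := (ciphertext.toList.filter PySem.Chars.isalpha).map PySem.Chars.lowerChar
  -- freq = Counter(only_letters)
  let freq := PySem.Dict.counter only_letters
  -- ranked = ''.join(c for c, _ in freq.most_common())   (ranked kept as List Char)
  let ranked0 := (PySem.List.sorted freq.items (fun kv => kv.2) true).map (fun kv => kv.1)
  -- for ch in ALPH: if ch not in ranked: ranked += ch
  let ranked := pvALPH.foldl (fun r ch => if r.contains ch then r else r ++ [ch]) ranked0
  -- guess_map = {c: ETAOIN[i] for i, c in enumerate(ranked)}; ETAOIN[i]: i < 26 always
  -- (ranked is a permutation of the alphabet), so the pyGetD default ' ' is unreachable.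
  ((PySem.List.enumerate ranked 0).foldl
      (fun d p => d.insert (String.mk [p.2]) (String.mk [PySem.List.pyGetD pvETAOIN p.1 ' ']))
      PySem.Dict.empty).items

-- ===== PORT B =====
-- loop body: if ch.isalpha(): c = ch.lower(); if c not in counts: order[c] = len(order); counts[c] = 0
--            counts[c] += 1            (len(order) = len(counts), both grow together)
def pvStepB (st : PySem.Dict Char Int × PySem.Dict Char Int) (ch : Char) :
    PySem.Dict Char Int × PySem.Dict Char Int :=
  if PySem.Chars.isalpha ch then
    let c := PySem.Chars.lowerChar ch
    let st' := if st.1.contains c then st else (st.1.insert c 0, st.2.insert c (st.1.size : Int))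
    (st'.1.modify c 0 (· + 1), st'.2)
  else st

-- inner scan: best = remaining[0]; for c in remaining[1:]: if key(c) < key(best): best = c
def pvArgmin (key : Char → Int) (best : Char) (rest : List Char) : Char :=
  rest.foldl (fun b c => if key c < key b then c else b) best

-- remaining.remove(best); best is always in remaining, the none branch is a totality guard
def pvRemove (x : Char) (l : List Char) : List Char :=
  match PySem.List.remove? l x with
  | some r => r
  | none => l

-- body of 'for plain in ETAOIN'; remaining is never empty (26 slots, 26 letters), the [] branch is a totality guard
def pvSelStep (key : Char → Int) (acc : List Char × PySem.Dict String String) (plain : Char) :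
    List Char × PySem.Dict String String :=
  match acc.1 with
  | [] => acc
  | b :: rest =>
    let best := pvArgmin key b rest
    (pvRemove best (b :: rest), acc.2.insert (String.mk [best]) (String.mk [plain]))

def initial_key_alt (ciphertext : String) : List (String × String) :=
  let st := ciphertext.toList.foldl pvStepB (PySem.Dict.empty, PySem.Dict.empty)
  -- key = lambda c: -26 * counts.get(c, 0) + order.get(c, ALPH.index(c))
  -- ALPH.index(c): c ∈ ALPH always, so index? is always some and its getD default 0 is unreachable.
  let key := fun c => -26 * st.1.getD c 0 +
      st.2.getD c (((PySem.List.index? pvALPH c).getD 0 : Nat) : Int)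
  (pvETAOIN.foldl (pvSelStep key) (pvALPH, PySem.Dict.empty)).2.items

-- ===== PRECONDITION & SPEC =====
def Spec_initial_key (ciphertext : String) (out : List (String × String)) : Prop := out = initial_key_alt ciphertext
instance (ciphertext : String) (out : List (String × String)) : Decidable (Spec_initial_key ciphertext out) := by unfold Spec_initial_key; infer_instance

-- ===== CLAIM (what is proved, stated in full; the proofs are below) =====
def Claim_equal_initial_key : Prop := ∀ (ciphertext : String), Dom_initial_key ciphertext → Spec_initial_key ciphertext (initial_key ciphertext)

-- ===== LEMMAS AND PROOFS =====

-- the lowercased letters of the text, their set in first-appearance order, and the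
-- composite ranking key both programs realise
def pvL (t : String) : List Char := (t.toList.filter PySem.Chars.isalpha).map PySem.Chars.lowerChar
def pvS (t : String) : List Char := PySem.Set.ofList (pvL t)
def pvKey (t : String) (c : Char) : Int :=
  -26 * ((pvL t).count c : Int) +
    (if c ∈ pvS t then ((pvS t).idxOf c : Int) else (pvALPH.idxOf c : Int))

-- A's ranked list: most_common keys, then the missing letters in alphabet order
def pvR0 (t : String) : List Char :=
  (PySem.List.sorted (PySem.Dict.counter (pvL t)).items (fun kv => kv.2) true).map (fun kv => kv.1)
def pvRA (t : String) : List Char := pvR0 t ++ pvALPH.filter (fun c => !(pvR0 t).contains c)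

-- B's loop body with the guard and the lowercasing peeled off
def pvStep' (st : PySem.Dict Char Int × PySem.Dict Char Int) (c : Char) :
    PySem.Dict Char Int × PySem.Dict Char Int :=
  if st.1.contains c then (st.1.modify c 0 (· + 1), st.2)
  else ((st.1.insert c 0).modify c 0 (· + 1), st.2.insert c (st.1.size : Int))

theorem pv_stepB_eq (st : PySem.Dict Char Int × PySem.Dict Char Int) (ch : Char) :
    pvStepB st ch = if PySem.Chars.isalpha ch then pvStep' st (PySem.Chars.lowerChar ch) else st := by
  simp only [pvStepB, pvStep']
  split_ifs with h1 h2 h2 <;> simp_all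

-- inserting x by two predicates that agree on x versus every element of the target list
theorem pv_insertBy_congr {α : Type} (b₁ b₂ : α → α → Bool) (x : α) (l : List α)
    (h : ∀ y ∈ l, b₁ x y = b₂ x y) :
    PySem.List.insertBy b₁ x l = PySem.List.insertBy b₂ x l := by
  induction l with
  | nil => rfl
  | cons y ys ih =>
    simp only [PySem.List.insertBy]
    rw [h y (List.mem_cons_self)]
    split
    · rfl
    · rw [ih (fun z hz => h z (List.mem_cons_of_mem _ hz))]

theorem pv_stab_aux {α : Type} (f g : α → Int) (xs : List α) :
    ∀ acc : List α,
    (∀ x ∈ xs, ∀ y ∈ acc, g y < g x) →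
    xs.Pairwise (fun a b => g a < g b) →
    (∀ x ∈ xs, 0 ≤ g x ∧ g x < 26) →
    (∀ y ∈ acc, 0 ≤ g y ∧ g y < 26) →
    xs.foldl (fun acc x => PySem.List.insertBy (fun a b => decide (f b < f a)) x acc) acc
      = xs.foldl (fun acc x => PySem.List.insertBy
          (fun a b => decide ((fun z => -26 * f z + g z) a < (fun z => -26 * f z + g z) b)) x acc) acc := by
  induction xs with
  | nil => intro acc _ _ _ _; rfl
  | cons x t ih =>
    intro acc hcross hpw hbx hbacc
    simp only [List.foldl_cons]
    have hstep : PySem.List.insertBy (fun a b => decide (f b < f a)) x acc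
        = PySem.List.insertBy (fun a b => decide (-26 * f a + g a < -26 * f b + g b)) x acc := by
      apply pv_insertBy_congr
      intro y hy
      have h1 : g y < g x := hcross x List.mem_cons_self y hy
      have h2 := hbx x List.mem_cons_self
      have h3 := hbacc y hy
      have hiff : (f y < f x) ↔ (-26 * f x + g x < -26 * f y + g y) := by
        constructor <;> intro h <;> omega
      simp only [decide_eq_decide]
      exact hiff
    rw [hstep]
    apply ih
    · intro x' hx' y hy
      rw [PySem.List.mem_insertBy] at hy
      rcases hy with rfl | hy
      · exact (List.pairwise_cons.mp hpw).1 x' hx'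
      · exact lt_trans (hcross x List.mem_cons_self y hy) ((List.pairwise_cons.mp hpw).1 x' hx')
    · exact (List.pairwise_cons.mp hpw).2
    · intro x' hx'; exact hbx x' (List.mem_cons_of_mem _ hx')
    · intro y hy
      rw [PySem.List.mem_insertBy] at hy
      rcases hy with rfl | hy
      · exact hbx y List.mem_cons_self
      · exact hbacc y hy

-- stability: the reverse (descending, stable) sort by f equals an ascending sort by the
-- composite key -26*f + g when g is a strictly increasing tie-breaker with 0 ≤ g < 26
theorem pv_stab {α : Type} (f g : α → Int) (xs : List α)
    (hg : xs.Pairwise (fun a b => g a < g b))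
    (h0 : ∀ x ∈ xs, 0 ≤ g x) (hB : ∀ x ∈ xs, g x < 26) :
    PySem.List.sorted xs f true = PySem.List.sorted xs (fun x => -26 * f x + g x) false := by
  rw [PySem.List.sorted_rev_eq_foldl_insertBy, PySem.List.sorted_eq_foldl_insertBy]
  exact pv_stab_aux f g xs [] (by simp) hg (fun x hx => ⟨h0 x hx, hB x hx⟩) (by simp)

theorem pv_pairwise_idxOf {α : Type} [DecidableEq α] (l : List α) (h : l.Nodup) :
    l.Pairwise (fun a b => l.idxOf a < l.idxOf b) := by
  induction l with
  | nil => exact List.Pairwise.nil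
  | cons a t ih =>
    have hna : a ∉ t := (List.nodup_cons.mp h).1
    have ht : t.Nodup := (List.nodup_cons.mp h).2
    refine List.Pairwise.cons ?_ ?_
    · intro b hb
      have hba : b ≠ a := fun e => hna (e ▸ hb)
      simp [hba.symm]
    · exact (ih ht).imp_of_mem (fun {b c} hb hc hlt => by
        have hba : b ≠ a := fun e => hna (e ▸ hb)
        have hca : c ≠ a := fun e => hna (e ▸ hc)
        simpa [hba.symm, hca.symm] using hlt)

-- the missing-letters loop of A appends exactly the letters not already present
theorem pv_fill (l : List Char) (hl : l.Nodup) : ∀ r0 : List Char,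
    l.foldl (fun r ch => if r.contains ch then r else r ++ [ch]) r0
      = r0 ++ l.filter (fun c => !r0.contains c) := by
  induction l with
  | nil => intro r0; simp
  | cons a t ih =>
    intro r0
    have hna : a ∉ t := (List.nodup_cons.mp hl).1
    have ht : t.Nodup := (List.nodup_cons.mp hl).2
    simp only [List.foldl_cons, List.filter_cons]
    by_cases hc : r0.contains a
    · rw [if_pos hc, ih ht]
      have hb : (!r0.contains a) = false := by simp_all
      rw [hb]
      simp
    · rw [if_neg hc]
      have hb : (!r0.contains a) = true := by simp_all
      rw [hb]
      simp only [if_true]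
      rw [ih ht (r0 ++ [a])]
      have hfil : t.filter (fun c => !(r0 ++ [a]).contains c) = t.filter (fun c => !r0.contains c) := by
        apply List.filter_congr
        intro c hcm
        have hca : c ≠ a := fun e => hna (e ▸ hcm)
        simp [hca]
      rw [hfil]
      simp

-- characterisation of B's one-pass state
theorem pv_stateB (l : List Char) :
    (l.foldl pvStep' (PySem.Dict.empty, PySem.Dict.empty)).1 = PySem.Dict.counter l ∧
    ∀ c, (l.foldl pvStep' (PySem.Dict.empty, PySem.Dict.empty)).2.get? c
      = if c ∈ PySem.Set.ofList l then some ((PySem.Set.ofList l).idxOf c : Int) else none := by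
  induction l using List.reverseRecOn with
  | nil =>
    constructor
    · rfl
    · intro c; simp [PySem.Set.ofList, PySem.Dict.get?, PySem.Dict.empty]
  | append_singleton l x ih =>
    obtain ⟨ih1, ih2⟩ := ih
    rw [List.foldl_append, List.foldl_cons, List.foldl_nil]
    set st := l.foldl pvStep' (PySem.Dict.empty, PySem.Dict.empty) with hstdef
    have hset : PySem.Set.ofList (l ++ [x]) = PySem.Set.add (PySem.Set.ofList l) x := by
      simp [PySem.Set.ofList_eq_foldl, List.foldl_append]
    by_cases hm : x ∈ PySem.Set.ofList l
    · have hmem : x ∈ l := (PySem.Set.mem_ofList l x).mp hm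
      have hcont : st.1.contains x = true := by
        rw [ih1, PySem.Dict.contains_counter]; simpa using hmem
      have hsetid : PySem.Set.add (PySem.Set.ofList l) x = PySem.Set.ofList l := by
        simp only [PySem.Set.add, PySem.Set.contains]
        rw [if_pos (by simpa using hm)]
      constructor
      · simp only [pvStep', hcont, if_true]
        rw [ih1, PySem.Dict.counter_append_singleton]
      · intro c
        simp only [pvStep', hcont, if_true]
        rw [ih2 c, hset, hsetid]
    · have hmem : x ∉ l := fun h => hm ((PySem.Set.mem_ofList l x).mpr h)
      have hcont : st.1.contains x = false := by
        rw [ih1, PySem.Dict.contains_counter]; simpa using hmem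
      have hcontc : (PySem.Dict.counter l).contains x = false := by rw [← ih1]; exact hcont
      have hsetadd : PySem.Set.add (PySem.Set.ofList l) x = PySem.Set.ofList l ++ [x] := by
        simp only [PySem.Set.add, PySem.Set.contains]
        rw [if_neg (by simpa using hm)]
      have hxS : x ∉ PySem.Set.ofList l := hm
      constructor
      · simp only [pvStep', hcont, Bool.false_eq_true, if_false]
        rw [ih1, PySem.Dict.counter_append_singleton]
        simp only [PySem.Dict.modify]
        rw [PySem.Dict.getD_insert_self, PySem.Dict.insert_insert_self,
          PySem.Dict.getD_of_not_contains (h := hcontc)]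
      · intro c
        simp only [pvStep', hcont, Bool.false_eq_true, if_false]
        rw [hset, hsetadd]
        have hsize : (st.1.size : Int) = ((PySem.Set.ofList l).length : Int) := by
          rw [ih1]
          simp [PySem.Dict.size, PySem.Dict.items_counter]
        rw [hsize, PySem.Dict.get?_insert]
        by_cases hcx : c = x
        · subst hcx
          rw [if_pos rfl, if_pos (by simp)]
          rw [List.idxOf_append_of_notMem hxS]
          simp
        · rw [if_neg hcx, ih2 c]
          by_cases hcm : c ∈ PySem.Set.ofList l
          · rw [if_pos hcm, if_pos (by simp [hcm])]
            rw [List.idxOf_append_of_mem hcm]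
          · rw [if_neg hcm, if_neg (by
              intro h
              rcases List.mem_append.mp h with h | h
              · exact hcm h
              · exact hcx (List.mem_singleton.mp h))]

-- lowercasing a letter lands in the alphabet
theorem pv_lower_mem (c : Char) (h : PySem.Chars.isalpha c = true) :
    PySem.Chars.lowerChar c ∈ pvALPH := by
  have halph : pvALPH = (List.range' 97 26).map Char.ofNat := by decide
  rw [halph, List.mem_map]
  simp only [PySem.Chars.isalpha, PySem.Chars.isupper, PySem.Chars.islower, Bool.or_eq_true,
    Bool.and_eq_true, decide_eq_true_eq] at h
  simp only [PySem.Chars.lowerChar, PySem.Chars.isupper, Bool.and_eq_true, decide_eq_true_eq]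
  rcases h with ⟨h1, h2⟩ | ⟨h1, h2⟩
  · have hn1 : 65 ≤ c.toNat := h1
    have hn2 : c.toNat ≤ 90 := h2
    refine ⟨c.toNat + 32, ?_, ?_⟩
    · rw [List.mem_range'_1]
      omega
    · rw [if_pos ⟨h1, h2⟩]
  · have hn1 : 97 ≤ c.toNat := h1
    have hn2 : c.toNat ≤ 122 := h2
    refine ⟨c.toNat, ?_, ?_⟩
    · rw [List.mem_range'_1]; omega
    · rw [if_neg ?_]
      · exact Char.ofNat_toNat c
      · rintro ⟨ha, hb⟩
        have : c.toNat ≤ 90 := hb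
        omega

theorem pv_S_sub (t : String) : ∀ c ∈ pvS t, c ∈ pvALPH := by
  intro c hc
  have hcl : c ∈ pvL t := (PySem.Set.mem_ofList _ _).mp hc
  simp only [pvL, List.mem_map, List.mem_filter] at hcl
  obtain ⟨ch, ⟨_, hal⟩, rfl⟩ := hcl
  exact pv_lower_mem ch hal

theorem pv_nodup_le_length {α : Type} (l1 l2 : List α) [DecidableEq α]
    (h1 : l1.Nodup) (hs : l1 ⊆ l2) : l1.length ≤ l2.length := by
  calc l1.length = l1.toFinset.card := (List.toFinset_card_of_nodup h1).symm
    _ ≤ l2.toFinset.card := Finset.card_le_card (fun x hx => by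
        simp only [List.mem_toFinset] at *; exact hs hx)
    _ ≤ l2.length := l2.toFinset_card_le

theorem pv_S_len (t : String) : (pvS t).length ≤ 26 := by
  have := pv_nodup_le_length (pvS t) pvALPH (PySem.Set.nodup_ofList _) (pv_S_sub t)
  simpa using this

theorem pv_idxOf_inj {α : Type} [DecidableEq α] (l : List α) (a b : α)
    (ha : a ∈ l) (hb : b ∈ l) (h : l.idxOf a = l.idxOf b) : a = b := by
  have h1 := List.getElem_idxOf (List.idxOf_lt_length_of_mem ha)
  have h2 := List.getElem_idxOf (List.idxOf_lt_length_of_mem hb)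
  rw [← h1, ← h2]
  congr 1

theorem pv_idxOf?_eq (l : List α) [DecidableEq α] (a : α) (ha : a ∈ l) :
    List.idxOf? a l = some (l.idxOf a) := by
  rw [List.idxOf?_eq_some_iff]
  refine ⟨List.idxOf_lt_length_of_mem ha, List.getElem_idxOf _, ?_⟩
  intro j hj
  have hj' : j < List.findIdx (fun x => x == a) l := hj
  have := List.not_of_lt_findIdx hj'
  simpa using this

-- pvKey separates present letters (negative key) from absent ones (their alphabet index)
theorem pv_key_present (t : String) (c : Char) (hc : c ∈ pvS t) :
    pvKey t c = -26 * ((pvL t).count c : Int) + ((pvS t).idxOf c : Int) := by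
  simp [pvKey, hc]

theorem pv_key_absent (t : String) (c : Char) (hc : c ∉ pvS t) :
    pvKey t c = (pvALPH.idxOf c : Int) := by
  have hcnt : (pvL t).count c = 0 := by
    rw [List.count_eq_zero]
    intro h
    exact hc ((PySem.Set.mem_ofList _ _).mpr h)
  simp [pvKey, hc, hcnt]

-- the head of A's ranking is a permutation of the distinct letters
theorem pv_R0_perm (t : String) : (pvR0 t).Perm (pvS t) := by
  have h2 := PySem.List.sorted_perm (PySem.Dict.counter (pvL t)).items (fun kv => kv.2) true
  have h3 := h2.map (fun kv : Char × Int => kv.1)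
  have h4 : (PySem.Dict.counter (pvL t)).items.map (fun kv : Char × Int => kv.1) = pvS t := by
    rw [PySem.Dict.items_counter]
    simp [pvS, List.map_map, Function.comp_def]
  rw [pvR0]
  rw [h4] at h3
  exact h3

theorem pv_R0_nodup (t : String) : (pvR0 t).Nodup :=
  ((pv_R0_perm t).nodup_iff).mpr (PySem.Set.nodup_ofList _)

-- A's most_common order is strictly increasing in the composite key
theorem pv_R0_pairwise (t : String) :
    (pvR0 t).Pairwise (fun a b => pvKey t a < pvKey t b) := by
  have hitems : (PySem.Dict.counter (pvL t)).items
      = (pvS t).map (fun k => (k, ((pvL t).count k : Int))) := PySem.Dict.items_counter _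
  have hSnd : (pvS t).Nodup := PySem.Set.nodup_ofList _
  have hg : ((PySem.Dict.counter (pvL t)).items).Pairwise
      (fun a b => ((pvS t).idxOf a.1 : Int) < ((pvS t).idxOf b.1 : Int)) := by
    rw [hitems, List.pairwise_map]
    exact (pv_pairwise_idxOf (pvS t) hSnd).imp (fun h => by exact_mod_cast h)
  have hmem1 : ∀ kv ∈ (PySem.Dict.counter (pvL t)).items, kv.1 ∈ pvS t := by
    intro kv hkv
    rw [hitems] at hkv
    obtain ⟨k, hk, rfl⟩ := List.mem_map.mp hkv
    exact hk
  have hidxlt : ∀ kv : Char × Int, kv.1 ∈ pvS t → ((pvS t).idxOf kv.1 : Int) < 26 := by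
    intro kv hkv
    have h1 : (pvS t).idxOf kv.1 < (pvS t).length := List.idxOf_lt_length_of_mem hkv
    have h2 := pv_S_len t
    exact_mod_cast lt_of_lt_of_le h1 h2
  have hstab := pv_stab (fun kv : Char × Int => kv.2) (fun kv => ((pvS t).idxOf kv.1 : Int))
    (PySem.Dict.counter (pvL t)).items hg
    (fun kv _ => by positivity)
    (fun kv hkv => hidxlt kv (hmem1 kv hkv))
  have hitemsnd : ((PySem.Dict.counter (pvL t)).items).Nodup := by
    rw [hitems]
    exact hSnd.map (fun a b h => by simpa using congrArg Prod.fst h)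
  have hpw' : (PySem.List.sorted (PySem.Dict.counter (pvL t)).items (fun kv => kv.2) true).Pairwise
      (fun a b => pvKey t a.1 < pvKey t b.1) := by
    rw [hstab]
    have hpwle := PySem.List.sorted_pairwise (PySem.Dict.counter (pvL t)).items
      (fun x : Char × Int => -26 * (fun kv : Char × Int => kv.2) x +
        (fun kv : Char × Int => ((pvS t).idxOf kv.1 : Int)) x)
    have hnd2 : (PySem.List.sorted (PySem.Dict.counter (pvL t)).items
        (fun x : Char × Int => -26 * (fun kv : Char × Int => kv.2) x +
          (fun kv : Char × Int => ((pvS t).idxOf kv.1 : Int)) x) false).Nodup := by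
      rw [(PySem.List.sorted_perm _ _ _).nodup_iff]
      exact hitemsnd
    refine (List.Pairwise.and hpwle hnd2).imp_of_mem ?_
    intro a b hma hmb hab
    obtain ⟨hle, hneq⟩ := hab
    have hma' := (PySem.List.mem_sorted _ _ _ _).mp hma
    have hmb' := (PySem.List.mem_sorted _ _ _ _).mp hmb
    obtain ⟨ka, hka, rfl⟩ := List.mem_map.mp (hitems ▸ hma')
    obtain ⟨kb, hkb, rfl⟩ := List.mem_map.mp (hitems ▸ hmb')
    rw [pv_key_present t ka hka, pv_key_present t kb hkb]
    simp only at hle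
    rcases lt_or_eq_of_le hle with hlt | heq
    · exact hlt
    · exfalso
      have hia := hidxlt (ka, ((pvL t).count ka : Int)) hka
      have hib := hidxlt (kb, ((pvL t).count kb : Int)) hkb
      simp only at hia hib
      have h0a : (0 : Int) ≤ ((pvS t).idxOf ka : Int) := by positivity
      have h0b : (0 : Int) ≤ ((pvS t).idxOf kb : Int) := by positivity
      have hidx : ((pvS t).idxOf ka : Int) = ((pvS t).idxOf kb : Int) := by omega
      have hkk : ka = kb := pv_idxOf_inj (pvS t) ka kb hka hkb (by exact_mod_cast hidx)
      have hcnt : ((pvL t).count ka : Int) = ((pvL t).count kb : Int) := by omega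
      exact hneq (by rw [hkk])
  rw [pvR0]
  exact List.pairwise_map.mpr hpw'

-- A's full ranked list: strictly increasing in pvKey, and a permutation of the alphabet
theorem pv_RA_mem_S (t : String) (c : Char) : c ∈ pvR0 t ↔ c ∈ pvS t := (pv_R0_perm t).mem_iff

theorem pv_RA_pairwise (t : String) :
    (pvRA t).Pairwise (fun a b => pvKey t a < pvKey t b) := by
  rw [pvRA, List.pairwise_append]
  refine ⟨pv_R0_pairwise t, ?_, ?_⟩
  · have halph := pv_pairwise_idxOf pvALPH (by decide)
    have hsub := List.Pairwise.sublist (List.filter_sublist (l := pvALPH)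
      (p := fun c => !(pvR0 t).contains c)) halph
    refine hsub.imp_of_mem ?_
    intro a b hma hmb hlt
    have hna : a ∉ pvS t := by
      have := (List.mem_filter.mp hma).2
      simp only [Bool.not_eq_true'] at this
      intro hc
      have : a ∈ pvR0 t := (pv_RA_mem_S t a).mpr hc
      simp_all
    have hnb : b ∉ pvS t := by
      have := (List.mem_filter.mp hmb).2
      simp only [Bool.not_eq_true'] at this
      intro hc
      have : b ∈ pvR0 t := (pv_RA_mem_S t b).mpr hc
      simp_all
    rw [pv_key_absent t a hna, pv_key_absent t b hnb]
    exact_mod_cast hlt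
  · intro a hma b hmb
    have hSa : a ∈ pvS t := (pv_RA_mem_S t a).mp hma
    have hnb : b ∉ pvS t := by
      have := (List.mem_filter.mp hmb).2
      simp only [Bool.not_eq_true'] at this
      intro hc
      have : b ∈ pvR0 t := (pv_RA_mem_S t b).mpr hc
      simp_all
    rw [pv_key_present t a hSa, pv_key_absent t b hnb]
    have hcnt : 0 < (pvL t).count a := by
      rw [List.count_pos_iff]
      exact (PySem.Set.mem_ofList _ _).mp hSa
    have hia : ((pvS t).idxOf a : Int) < 26 := by
      have := List.idxOf_lt_length_of_mem hSa
      have h2 := pv_S_len t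
      exact_mod_cast lt_of_lt_of_le this h2
    have h0b : (0 : Int) ≤ (pvALPH.idxOf b : Int) := by positivity
    have hcnt' : (1 : Int) ≤ ((pvL t).count a : Int) := by exact_mod_cast hcnt
    have h0a : (0 : Int) ≤ ((pvS t).idxOf a : Int) := by positivity
    omega

theorem pv_RA_perm (t : String) : (pvRA t).Perm pvALPH := by
  have halphnd : pvALPH.Nodup := by decide
  have hfil : (pvR0 t).Perm (pvALPH.filter (fun c => (pvR0 t).contains c)) := by
    apply (List.perm_ext_iff_of_nodup (pv_R0_nodup t) (halphnd.filter _)).mpr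
    intro a
    rw [List.mem_filter]
    constructor
    · intro ha
      refine ⟨pv_S_sub t a ((pv_RA_mem_S t a).mp ha), ?_⟩
      simpa using ha
    · intro ⟨_, ha⟩
      simpa using ha
  have h1 : (pvRA t).Perm ((pvALPH.filter (fun c => (pvR0 t).contains c))
      ++ pvALPH.filter (fun c => !(pvR0 t).contains c)) := by
    rw [pvRA]
    exact hfil.append_right _
  exact h1.trans (List.filter_append_perm _ pvALPH)

-- B's one-pass fold over the whole text equals the peeled fold over the letters
theorem pv_foldB (t : String) :
    t.toList.foldl pvStepB (PySem.Dict.empty, PySem.Dict.empty)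
      = (pvL t).foldl pvStep' (PySem.Dict.empty, PySem.Dict.empty) := by
  have hfun : pvStepB = fun st ch =>
      if PySem.Chars.isalpha ch then pvStep' st (PySem.Chars.lowerChar ch) else st :=
    funext fun st => funext fun ch => pv_stepB_eq st ch
  rw [hfun]
  rw [PySem.List.foldl_if_eq_foldl_filter]
  rw [pvL, ← List.foldl_map]

-- A's result is the output construction applied to its ranked list pvRA
theorem pv_A_eq (t : String) :
    initial_key t = ((PySem.List.enumerate (pvRA t) 0).foldl
      (fun d p => d.insert (String.mk [p.2]) (String.mk [PySem.List.pyGetD pvETAOIN p.1 ' ']))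
      PySem.Dict.empty).items := by
  simp only [initial_key]
  rw [pv_fill pvALPH (by decide)]
  rfl

-- the two output constructions agree on any 26-letter ranking R:
-- A's enumerate-indexed build equals inserting the pairs of zip R ETAOIN in order
theorem pv_out_eq (R : List Char) (hR : R.Perm pvALPH) :
    ((PySem.List.enumerate R 0).foldl
        (fun d p => d.insert (String.mk [p.2]) (String.mk [PySem.List.pyGetD pvETAOIN p.1 ' ']))
        PySem.Dict.empty).items
      = ((R.zip pvETAOIN).foldl
          (fun d q => d.insert (String.mk [q.1]) (String.mk [q.2])) PySem.Dict.empty).items := by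
  have hlen : R.length = 26 := by
    have := hR.length_eq
    simpa using this
  have hnd : R.Nodup := hR.nodup_iff.mpr (by decide)
  have hinj : Function.Injective (fun c : Char => String.mk [c]) := by
    intro a b h
    have h2 := congrArg String.toList h
    rw [show (String.mk [a]).toList = [a] from Eq.symm ((fun {l} {s} => String.ofList_eq.mp) rfl),
      show (String.mk [b]).toList = [b] from Eq.symm ((fun {l} {s} => String.ofList_eq.mp) rfl)] at h2
    simpa using h2
  have hA := PySem.Dict.items_foldl_insert_fresh (PySem.List.enumerate R 0)
    (fun p => String.mk [p.2]) (fun p => String.mk [PySem.List.pyGetD pvETAOIN p.1 ' '])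
    PySem.Dict.empty (fun a _ => by simp [PySem.Dict.contains_empty])
    (by
      have : (PySem.List.enumerate R 0).map (fun p => String.mk [p.2])
          = R.map (fun c => String.mk [c]) := by
        rw [show (fun p : Int × Char => String.mk [p.2])
            = (fun c : Char => String.mk [c]) ∘ (fun p : Int × Char => p.2) from rfl]
        rw [← List.map_map, PySem.List.map_snd_enumerate]
      rw [this]
      exact hnd.map hinj)
  have hB := PySem.Dict.items_foldl_insert_fresh (R.zip pvETAOIN)
    (fun q => String.mk [q.1]) (fun q => String.mk [q.2]) PySem.Dict.empty
    (fun a _ => by simp [PySem.Dict.contains_empty])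
    (by
      have : (R.zip pvETAOIN).map (fun q => String.mk [q.1])
          = R.map (fun c => String.mk [c]) := by
        rw [show (fun q : Char × Char => String.mk [q.1])
            = (fun c : Char => String.mk [c]) ∘ (fun q : Char × Char => q.1) from rfl]
        rw [← List.map_map, List.map_fst_zip]
        rw [hlen]; decide
      rw [this]
      exact hnd.map hinj)
  rw [hA, hB]
  rw [show (PySem.Dict.empty : PySem.Dict String String).items = [] from rfl]
  simp only [List.nil_append]
  apply List.ext_getElem
  · simp [PySem.List.length_enumerate, hlen, List.length_zip, pvETAOIN]
  · intro i h1 h2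
    simp only [PySem.List.length_enumerate, List.length_map] at h1
    have hi : i < 26 := by omega
    have hiE : i < pvETAOIN.length := by simp [pvETAOIN]; omega
    rw [List.getElem_map, List.getElem_map, PySem.List.getElem_enumerate, List.getElem_zip]
    dsimp only
    have h0i : ((0 : Int) + (i : Int)) = (i : Int) := by omega
    have hg : PySem.List.pyGetD pvETAOIN ((0 : Int) + (i : Int)) ' ' = pvETAOIN[i] := by
      rw [h0i, PySem.List.pyGetD_eq_getElem pvETAOIN ' ' (by positivity) (by exact_mod_cast hiE)]
      congr 1
    rw [hg]

-- B's composite key agrees with pvKey on the alphabet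
theorem pv_kB_eq (t : String) : ∀ c ∈ pvALPH,
    (-26 * ((t.toList.foldl pvStepB (PySem.Dict.empty, PySem.Dict.empty)).1.getD c 0)
      + (t.toList.foldl pvStepB (PySem.Dict.empty, PySem.Dict.empty)).2.getD c
          (((PySem.List.index? pvALPH c).getD 0 : Nat) : Int)) = pvKey t c := by
  intro c hc
  obtain ⟨h1, h2⟩ := pv_stateB (pvL t)
  rw [pv_foldB t, h1, PySem.Dict.getD_counter, PySem.Dict.getD_eq_get?_getD, h2 c]
  by_cases hm : c ∈ pvS t
  · have hm' : c ∈ pvL t := (PySem.Set.mem_ofList _ _).mp hm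
    rw [if_pos (by simpa [pvS] using hm)]
    simp [pvKey, hm', pvS]
  · have hm' : c ∉ pvL t := fun h => hm ((PySem.Set.mem_ofList _ _).mpr h)
    rw [if_neg (by simpa [pvS] using hm)]
    have hidx : PySem.List.index? pvALPH c = some (pvALPH.idxOf c) := pv_idxOf?_eq pvALPH c hc
    rw [pv_key_absent t c hm]
    have hcnt : List.count c (pvL t) = 0 := List.count_eq_zero.mpr hm'
    have hidx2 : List.idxOf? c pvALPH = some (pvALPH.idxOf c) := pv_idxOf?_eq pvALPH c hc
    simp [hcnt, hidx2]

-- ---- selection-sort machinery for B's extraction loop ----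

-- the extraction sequence of B's loop, as a pure selection sort (fuel = slots left)
def pvSelSort (key : Char → Int) : Nat → List Char → List Char
  | 0, _ => []
  | _ + 1, [] => []
  | n + 1, b :: rest =>
    pvArgmin key b rest :: pvSelSort key n (pvRemove (pvArgmin key b rest) (b :: rest))

theorem pv_selsort_nil (key : Char → Int) (n : Nat) : pvSelSort key n [] = [] := by
  cases n <;> rfl

theorem pv_argmin_mem (key : Char → Int) (rest : List Char) :
    ∀ b, pvArgmin key b rest ∈ b :: rest := by
  induction rest with
  | nil => intro b; simp [pvArgmin]
  | cons c cs ih =>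
    intro b
    have h := ih (if key c < key b then c else b)
    simp only [pvArgmin, List.foldl_cons] at h ⊢
    rcases List.mem_cons.mp h with h1 | h1
    · rw [h1]
      split_ifs <;> simp
    · simp [h1]

theorem pv_argmin_le (key : Char → Int) (rest : List Char) :
    ∀ b, ∀ x ∈ b :: rest, key (pvArgmin key b rest) ≤ key x := by
  induction rest with
  | nil =>
    intro b x hx
    rcases List.mem_cons.mp hx with rfl | h
    · simp [pvArgmin]
    · simp at h
  | cons c cs ih =>
    intro b x hx
    simp only [pvArgmin, List.foldl_cons]
    have hmin : key (if key c < key b then c else b) ≤ key b ∧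
        key (if key c < key b then c else b) ≤ key c := by
      by_cases hk : key c < key b <;> simp [hk] <;> omega
    rcases List.mem_cons.mp hx with rfl | hx'
    · exact le_trans (ih _ _ (List.mem_cons_self)) hmin.1
    · rcases List.mem_cons.mp hx' with rfl | hx'' 
      · exact le_trans (ih _ _ (List.mem_cons_self)) hmin.2
      · exact ih _ _ (List.mem_cons_of_mem _ hx'')

theorem pv_remove_eq_erase (x : Char) (l : List Char) (h : x ∈ l) :
    pvRemove x l = l.erase x := by
  rw [pvRemove, PySem.List.remove?_eq_some_erase (h := h)]

theorem pv_selsort_perm (key : Char → Int) :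
    ∀ (n : Nat) (L : List Char), L.length = n → (pvSelSort key n L).Perm L := by
  intro n
  induction n with
  | zero => intro L h; rw [List.length_eq_zero_iff.mp h]; simp [pvSelSort]
  | succ m ih =>
    intro L h
    match L with
    | [] => simp at h
    | b :: rest =>
      have hbm : pvArgmin key b rest ∈ b :: rest := pv_argmin_mem key rest b
      rw [pvSelSort]
      rw [pv_remove_eq_erase _ _ hbm]
      have hlen : ((b :: rest).erase (pvArgmin key b rest)).length = m := by
        rw [List.length_erase_of_mem hbm]
        simpa using h
      have hperm := ih _ hlen
      exact (hperm.cons _).trans (List.perm_cons_erase hbm).symm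

theorem pv_selsort_pairwise (key : Char → Int) :
    ∀ (n : Nat) (L : List Char), L.length = n → L.Nodup →
      (∀ a ∈ L, ∀ b ∈ L, a ≠ b → key a ≠ key b) →
      (pvSelSort key n L).Pairwise (fun a b => key a < key b) := by
  intro n
  induction n with
  | zero => intro L h _ _; rw [List.length_eq_zero_iff.mp h]; simp [pvSelSort]
  | succ m ih =>
    intro L hlen hnd hinj
    match L with
    | [] => simp at hlen
    | b :: rest =>
      have hbm : pvArgmin key b rest ∈ b :: rest := pv_argmin_mem key rest b
      rw [pvSelSort, pv_remove_eq_erase _ _ hbm]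
      have hlen' : ((b :: rest).erase (pvArgmin key b rest)).length = m := by
        rw [List.length_erase_of_mem hbm]
        simpa using hlen
      have hnd' : ((b :: rest).erase (pvArgmin key b rest)).Nodup := hnd.erase _
      have hsub : ∀ x ∈ (b :: rest).erase (pvArgmin key b rest), x ∈ b :: rest :=
        fun x hx => List.mem_of_mem_erase hx
      have hinj' : ∀ a ∈ (b :: rest).erase (pvArgmin key b rest),
          ∀ c ∈ (b :: rest).erase (pvArgmin key b rest), a ≠ c → key a ≠ key c :=
        fun a ha c hc => hinj a (hsub a ha) c (hsub c hc)
      refine List.Pairwise.cons ?_ (ih _ hlen' hnd' hinj')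
      intro x hx
      have hxE : x ∈ (b :: rest).erase (pvArgmin key b rest) :=
        (pv_selsort_perm key m _ hlen').mem_iff.mp hx
      have hxL : x ∈ b :: rest := hsub x hxE
      have hxne : x ≠ pvArgmin key b rest := (hnd.mem_erase_iff.mp hxE).1
      have hle : key (pvArgmin key b rest) ≤ key x := pv_argmin_le key rest b x hxL
      have hne : key (pvArgmin key b rest) ≠ key x :=
        hinj (pvArgmin key b rest) hbm x hxL (fun e => hxne e.symm)
      omega

-- B's ETAOIN fold is the fold of inserts along zip (pvSelSort key |P| R) P
theorem pv_fold_sel (key : Char → Int) :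
    ∀ (P R : List Char) (d : PySem.Dict String String),
      (P.foldl (pvSelStep key) (R, d)).2
        = ((pvSelSort key P.length R).zip P).foldl
            (fun d q => d.insert (String.mk [q.1]) (String.mk [q.2])) d := by
  intro P
  induction P with
  | nil => intro R d; simp [pvSelSort]
  | cons p ps ih =>
    intro R d
    match R with
    | [] =>
      simp only [List.foldl_cons, pvSelStep]
      rw [ih [] d]
      rw [pv_selsort_nil, pv_selsort_nil]
      simp
    | b :: rest =>
      simp only [List.foldl_cons, pvSelStep, List.length_cons]
      rw [ih _ _]
      rw [pvSelSort]
      simp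

-- pvKey is injective on the alphabet (two distinct members of the strictly pvKey-sorted
-- permutation pvRA have strictly ordered, hence distinct, keys)
theorem pv_key_inj (t : String) :
    ∀ a ∈ pvALPH, ∀ b ∈ pvALPH, a ≠ b → pvKey t a ≠ pvKey t b := by
  intro a ha b hb hab
  have hpw := pv_RA_pairwise t
  rw [List.pairwise_iff_getElem] at hpw
  have ha' : a ∈ pvRA t := (pv_RA_perm t).mem_iff.mpr ha
  have hb' : b ∈ pvRA t := (pv_RA_perm t).mem_iff.mpr hb
  have hia := List.idxOf_lt_length_of_mem ha'
  have hib := List.idxOf_lt_length_of_mem hb'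
  have hga := List.getElem_idxOf hia
  have hgb := List.getElem_idxOf hib
  have hne : (pvRA t).idxOf a ≠ (pvRA t).idxOf b := by
    intro h
    exact hab (pv_idxOf_inj _ a b ha' hb' h)
  rcases Nat.lt_or_ge ((pvRA t).idxOf a) ((pvRA t).idxOf b) with h | h
  · have := hpw _ _ hia hib h
    rw [hga, hgb] at this
    omega
  · have hlt : (pvRA t).idxOf b < (pvRA t).idxOf a := lt_of_le_of_ne h (fun e => hne e.symm)
    have := hpw _ _ hib hia hlt
    rw [hga, hgb] at this
    omega

-- ===== VERDICT (by name: the statement is the Claim_ definition above) =====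
theorem initial_key_spec : Claim_equal_initial_key := by
  intro t _
  unfold Spec_initial_key
  show initial_key t = initial_key_alt t
  simp only [initial_key_alt]
  set kB := fun c => -26 * ((t.toList.foldl pvStepB (PySem.Dict.empty, PySem.Dict.empty)).1.getD c 0)
      + (t.toList.foldl pvStepB (PySem.Dict.empty, PySem.Dict.empty)).2.getD c
          (((PySem.List.index? pvALPH c).getD 0 : Nat) : Int) with hkBdef
  have hkB : ∀ c ∈ pvALPH, kB c = pvKey t c := pv_kB_eq t
  have halphnd : pvALPH.Nodup := by decide
  have hlenA : pvALPH.length = pvETAOIN.length := by decide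
  -- the extraction sequence equals A's ranked list
  have hperm : (pvSelSort kB pvETAOIN.length pvALPH).Perm pvALPH :=
    pv_selsort_perm kB pvETAOIN.length pvALPH hlenA.symm
  have hinjB : ∀ a ∈ pvALPH, ∀ b ∈ pvALPH, a ≠ b → kB a ≠ kB b := by
    intro a ha b hb hab
    rw [hkB a ha, hkB b hb]
    exact pv_key_inj t a ha b hb hab
  have hpwB : (pvSelSort kB pvETAOIN.length pvALPH).Pairwise (fun a b => kB a < kB b) :=
    pv_selsort_pairwise kB pvETAOIN.length pvALPH hlenA.symm halphnd hinjB
  have hpwB' : (pvSelSort kB pvETAOIN.length pvALPH).Pairwise (fun a b => pvKey t a < pvKey t b) := by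
    refine hpwB.imp_of_mem ?_
    intro a b hma hmb hlt
    rw [← hkB a (hperm.mem_iff.mp hma), ← hkB b (hperm.mem_iff.mp hmb)]
    exact hlt
  have hsel : pvSelSort kB pvETAOIN.length pvALPH = pvRA t := by
    refine List.Perm.eq_of_pairwise ?_ hpwB' (pv_RA_pairwise t)
      (hperm.trans (pv_RA_perm t).symm)
    intro a b _ _ h1 h2
    exfalso; omega
  rw [pv_fold_sel kB pvETAOIN pvALPH PySem.Dict.empty, hsel]
  rw [pv_A_eq t]
  exact pv_out_eq (pvRA t) (pv_RA_perm t)
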